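-- pv_equiv track=rewrite | github.com/pypi-data/pypi-mirror-68 | packages/batchcompute-cli/batchcompute-cli-1.7.7.tar.gz/batchcompute-cli-1.7.7/src/batchcompute_cli/util/dag.py | getFirstColumn
-- ===== SOURCE A (Python) =====
-- def getFirstColumn(deps):
--
--     allTargets = set()
--     for k in deps:
--         allTargets = allTargets | set(deps[k])
--     allTargets = [i for i in allTargets]
--
--     t = []
--     for k in deps:
--         if k not in allTargets:
--             t.append(k)
--     return t
-- ===== SOURCE B (Python) =====
-- def getFirstColumn(deps):
--     # A key is a root iff no dependency list mentions it: test each key directly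
--     # with a nested existential scan, building no intermediate target collection.
--     return [k for k in deps
--             if not any(k in targets for targets in deps.values())]
-- ===== Notes on version B (the rewrite author's own statement) =====
-- stated objective: simpler
-- what changed: A stages two passes (build the union set of all targets by repeated set unions, list it, then filter the keys against it); B builds no intermediate target collection at all and instead decides each key directly with a nested existential scan over the value lists (a single comprehension with any()).
import Mathlib
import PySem

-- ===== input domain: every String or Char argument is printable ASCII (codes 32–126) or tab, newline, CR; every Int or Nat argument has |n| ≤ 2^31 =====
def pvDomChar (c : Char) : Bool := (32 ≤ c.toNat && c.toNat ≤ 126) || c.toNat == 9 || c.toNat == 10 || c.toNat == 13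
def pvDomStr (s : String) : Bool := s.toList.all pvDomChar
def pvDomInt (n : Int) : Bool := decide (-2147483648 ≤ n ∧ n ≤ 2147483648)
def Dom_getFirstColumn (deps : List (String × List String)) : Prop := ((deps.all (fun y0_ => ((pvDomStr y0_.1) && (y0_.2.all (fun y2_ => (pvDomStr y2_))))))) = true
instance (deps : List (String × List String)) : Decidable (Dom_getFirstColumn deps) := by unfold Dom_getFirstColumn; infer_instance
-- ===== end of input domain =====

-- B builds no intermediate target collection: each key is tested directly with a
-- nested existential scan over the value lists (objective: simpler — one comprehension
-- instead of A's staged set-union pass followed by a filter pass).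

-- ===== PORT A =====
-- A: build the union set of all targets, list it, then append every key not in it.
-- The listed set ([i for i in allTargets]) is only used for membership tests, which do
-- not depend on Python's set iteration order, so the PySem.Set element list is exact here.
def getFirstColumn (deps : List (String × List String)) : List String :=
  let d := PySem.Dict.ofList deps
  let allTargets : PySem.Set String :=
    d.keys.foldl (fun s k => PySem.Set.union s (PySem.Set.ofList (d.getD k []))) PySem.Set.empty
  let allTargetsList : List String := allTargets
  d.keys.foldl (fun t k => if allTargetsList.contains k then t else t ++ [k]) []

-- ===== PORT B =====
-- B: [k for k in deps if not any(k in targets for targets in deps.values())]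
def getFirstColumn_alt (deps : List (String × List String)) : List String :=
  let d := PySem.Dict.ofList deps
  d.keys.filter (fun k => !(d.values.any (fun targets => targets.contains k)))

-- ===== PRECONDITION & SPEC =====
def Spec_getFirstColumn (deps : List (String × List String)) (out : List String) : Prop := out = getFirstColumn_alt deps
instance (deps : List (String × List String)) (out : List String) : Decidable (Spec_getFirstColumn deps out) := by unfold Spec_getFirstColumn; infer_instance

-- ===== CLAIM (what is proved, stated in full; the proofs are below) =====
def Claim_equal_getFirstColumn : Prop := ∀ (deps : List (String × List String)), Dom_getFirstColumn deps → Spec_getFirstColumn deps (getFirstColumn deps)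

-- ===== LEMMAS AND PROOFS =====

-- A's append-unless-member loop is a filter
theorem foldl_skip_if (bs ks acc : List String) :
    ks.foldl (fun t k => if bs.contains k then t else t ++ [k]) acc
      = acc ++ ks.filter (fun k => !bs.contains k) := by
  induction ks generalizing acc with
  | nil => simp
  | cons k ks ih =>
    rw [List.foldl_cons]
    by_cases h : bs.contains k = true
    · rw [if_pos h, ih, List.filter_cons_of_neg (by simpa using h)]
    · rw [if_neg h, ih, List.filter_cons_of_pos (by simpa using h), List.append_assoc]
      rfl

-- membership in A's accumulated target set
theorem mem_foldl_union (g : String → List String) (ks : List String) (s : PySem.Set String) (x : String) :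
    x ∈ ks.foldl (fun s k => PySem.Set.union s (PySem.Set.ofList (g k))) s ↔
      x ∈ s ∨ ∃ k ∈ ks, x ∈ g k := by
  induction ks generalizing s with
  | nil => simp
  | cons k ks ih =>
    simp only [List.foldl_cons, ih, PySem.Set.mem_union, PySem.Set.mem_ofList, List.mem_cons]
    constructor
    · rintro ((h | h) | ⟨j, hj, hx⟩)
      · exact Or.inl h
      · exact Or.inr ⟨k, Or.inl rfl, h⟩
      · exact Or.inr ⟨j, Or.inr hj, hx⟩
    · rintro (h | ⟨j, (rfl | hj), hx⟩)
      · exact Or.inl (Or.inl h)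
      · exact Or.inl (Or.inr hx)
      · exact Or.inr ⟨j, hj, hx⟩

-- ===== VERDICT (by name: the statement is the Claim_ definition above) =====
theorem getFirstColumn_spec : Claim_equal_getFirstColumn := by
  intro deps _
  unfold Spec_getFirstColumn getFirstColumn getFirstColumn_alt
  dsimp only
  set d := PySem.Dict.ofList deps with hd
  set ks := d.keys with hks
  have hnd : ks.Nodup := PySem.Dict.nodup_keys_ofList deps
  rw [foldl_skip_if, List.nil_append]
  apply List.filter_congr
  intro k _
  congr 1
  rw [PySem.Dict.values_eq_map_keys d hnd [], List.any_map, Bool.eq_iff_iff]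
  simp only [List.any_eq_true, Function.comp, List.contains_eq_mem, decide_eq_true_eq]
  rw [mem_foldl_union (fun k => d.getD k []) ks PySem.Set.empty k]
  simp only [PySem.Set.empty, List.not_mem_nil, false_or]
  rfl
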